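-- pv_equiv track=rewrite | github.com/pypi-data/pypi-mirror-367 | packages/a3/a3-0.4.4-py3-none-any.whl/a3/core/code_syntax_fixer.py | _fix_incomplete_try_blocks
-- ===== SOURCE A (Python) =====
-- def _fix_incomplete_try_blocks(content: str) -> str:
--     """Fix incomplete try blocks by adding missing except/finally."""
--     lines = content.split('\n')
--     fixed_lines = []
--     i = 0
--
--     while i < len(lines):
--         line = lines[i]
--         stripped = line.strip()
--
--         # Check for try block
--         if stripped.startswith('try:'):
--             fixed_lines.append(line)
--             try_indent = len(line) - len(line.lstrip())
--             i += 1
--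
--             # Look for the corresponding except/finally
--             found_except_or_finally = False
--
--             while i < len(lines):
--                 current_line = lines[i]
--                 current_stripped = current_line.strip()
--                 current_indent = len(current_line) - len(current_line.lstrip()) if current_line.strip() else try_indent + 4
--
--                 # If we find except or finally at the same level, we're good
--                 if (current_stripped.startswith('except') or current_stripped.startswith('finally')) and current_indent == try_indent:
--                     found_except_or_finally = True
--                     fixed_lines.append(current_line)
--                     break
--
--                 # If we find a line at the same or lower indentation level that's not except/finally
--                 elif current_line.strip() and current_indent <= try_indent and not (current_stripped.startswith('except') or current_stripped.startswith('finally')):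
--                     # Add a generic except block
--                     if not found_except_or_finally:
--                         fixed_lines.append(' ' * try_indent + 'except Exception as e:')
--                         fixed_lines.append(' ' * (try_indent + 4) + 'pass')
--                     fixed_lines.append(current_line)
--                     break
--                 else:
--                     fixed_lines.append(current_line)
--
--                 i += 1
--
--             # If we reached the end without finding except/finally
--             if not found_except_or_finally and i >= len(lines):
--                 fixed_lines.append(' ' * try_indent + 'except Exception as e:')
--                 fixed_lines.append(' ' * (try_indent + 4) + 'pass')
--         else:
--             fixed_lines.append(line)
--
--         i += 1
--
--     return '\n'.join(fixed_lines)
-- ===== SOURCE B (Python) =====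
-- def _fix_incomplete_try_blocks(content: str) -> str:
--     """Fix incomplete try blocks by adding missing except/finally."""
--
--     def step(try_indent, line):
--         """One line of the state machine: (state, emitted lines).
--         State is None outside a try block, else the try's indent."""
--         stripped = line.strip()
--         if try_indent is None:
--             new = len(line) - len(line.lstrip()) if stripped.startswith('try:') else None
--             return new, [line]
--         indent = len(line) - len(line.lstrip()) if stripped else try_indent + 4
--         handler = stripped.startswith('except') or stripped.startswith('finally')
--         if handler and indent == try_indent:
--             return None, [line]
--         if stripped and indent <= try_indent and not handler:
--             return None, [' ' * try_indent + 'except Exception as e:',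
--                           ' ' * (try_indent + 4) + 'pass',
--                           line]
--         return try_indent, [line]
--
--     state, out = None, []
--     for line in content.split('\n'):
--         state, emitted = step(state, line)
--         out.extend(emitted)
--     if state is not None:
--         out.append(' ' * state + 'except Exception as e:')
--         out.append(' ' * (state + 4) + 'pass')
--     return '\n'.join(out)
-- ===== Notes on version B (the rewrite author's own statement) =====
-- stated objective: simpler
-- what changed: A's nested while-loops (an inner scan that hunts for the matching except/finally after each try:) are replaced by a single flat fold over the lines carrying the open-try indent as state, with the trailing except/pass emitted once after the loop.
import Mathlib
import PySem

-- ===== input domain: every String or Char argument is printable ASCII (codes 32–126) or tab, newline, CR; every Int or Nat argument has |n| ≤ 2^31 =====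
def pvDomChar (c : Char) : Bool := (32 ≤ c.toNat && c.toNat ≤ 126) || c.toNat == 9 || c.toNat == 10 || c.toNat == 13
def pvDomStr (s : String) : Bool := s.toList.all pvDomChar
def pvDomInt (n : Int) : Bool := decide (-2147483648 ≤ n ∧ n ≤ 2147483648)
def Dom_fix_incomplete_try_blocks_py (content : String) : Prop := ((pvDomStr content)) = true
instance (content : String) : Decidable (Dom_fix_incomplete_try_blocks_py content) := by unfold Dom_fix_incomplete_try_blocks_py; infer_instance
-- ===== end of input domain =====

-- B replaces A's nested while-loops (inner scan for the matching except/finally) by a single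
-- flat fold over the lines carrying the open-try state; objective: simpler, same cost.

-- shared text helpers (both Pythons build the same literal lines)
def pvIndent (l : String) : Int := PySem.Str.len l - PySem.Str.len (PySem.Str.lstrip l)
def pvExcLine (ti : Int) : String := String.ofList (List.replicate ti.toNat ' ' ++ "except Exception as e:".toList)
def pvPassLine (ti : Int) : String := String.ofList (List.replicate (ti + 4).toNat ' ' ++ "pass".toList)

-- ===== PORT A =====
mutual
-- outer while-loop of A: not inside a try block
def pvAouter (lines : List String) (acc : List String) : List String :=
  match lines with
  | [] => acc
  | line :: rest =>
    let stripped := PySem.Str.strip line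
    if PySem.Str.startswith stripped "try:" then
      pvAinner rest (pvIndent line) (acc ++ [line])
    else
      pvAouter rest (acc ++ [line])
-- inner while-loop of A: scanning for the except/finally of an open try (indent ti)
def pvAinner (lines : List String) (ti : Int) (acc : List String) : List String :=
  match lines with
  | [] => acc ++ [pvExcLine ti, pvPassLine ti]
  | line :: rest =>
    let s := PySem.Str.strip line
    let ind := if s ≠ "" then pvIndent line else ti + 4
    let h := PySem.Str.startswith s "except" || PySem.Str.startswith s "finally"
    if h = true ∧ ind = ti then pvAouter rest (acc ++ [line])
    else if s ≠ "" ∧ ind ≤ ti ∧ ¬ h = true then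
      pvAouter rest (acc ++ [pvExcLine ti, pvPassLine ti, line])
    else
      pvAinner rest ti (acc ++ [line])
end

def fix_incomplete_try_blocks_py (content : String) : String :=
  PySem.Str.join "\n" (pvAouter ((PySem.Str.split? content "\n").getD []) [])

-- ===== PORT B =====
-- one step of B's state machine: state (none = outside a try) and the lines emitted
def pvBstep (st : Option Int) (line : String) : Option Int × List String :=
  let stripped := PySem.Str.strip line
  match st with
  | none =>
    ((if PySem.Str.startswith stripped "try:" then some (pvIndent line) else none), [line])
  | some ti =>
    let ind := if stripped ≠ "" then pvIndent line else ti + 4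
    let h := PySem.Str.startswith stripped "except" || PySem.Str.startswith stripped "finally"
    if h = true ∧ ind = ti then (none, [line])
    else if stripped ≠ "" ∧ ind ≤ ti ∧ ¬ h = true then
      (none, [pvExcLine ti, pvPassLine ti, line])
    else (some ti, [line])

def fix_incomplete_try_blocks_py_alt (content : String) : String :=
  let r := ((PySem.Str.split? content "\n").getD []).foldl
    (fun p line => let q := pvBstep p.1 line; (q.1, p.2 ++ q.2))
    ((none : Option Int), ([] : List String))
  let out := match r.1 with
    | none => r.2
    | some ti => r.2 ++ [pvExcLine ti, pvPassLine ti]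
  PySem.Str.join "\n" out

-- ===== PRECONDITION & SPEC =====
def Spec_fix_incomplete_try_blocks_py (content : String) (out : String) : Prop := out = fix_incomplete_try_blocks_py_alt content
instance (content : String) (out : String) : Decidable (Spec_fix_incomplete_try_blocks_py content out) := by unfold Spec_fix_incomplete_try_blocks_py; infer_instance

-- ===== CLAIM (what is proved, stated in full; the proofs are below) =====
def Claim_equal_fix_incomplete_try_blocks_py : Prop := ∀ (content : String), Dom_fix_incomplete_try_blocks_py content → Spec_fix_incomplete_try_blocks_py content (fix_incomplete_try_blocks_py content)

-- ===== LEMMAS AND PROOFS =====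

-- closing step of B, as a function (proof-side only)
def pvFinish (r : Option Int × List String) : List String :=
  match r.1 with
  | none => r.2
  | some ti => r.2 ++ [pvExcLine ti, pvPassLine ti]

-- B's fold from any state/accumulator computes exactly A's corresponding loop
lemma pvMain (lines : List String) : ∀ (st : Option Int) (acc : List String),
    pvFinish (lines.foldl (fun p line => let q := pvBstep p.1 line; (q.1, p.2 ++ q.2)) (st, acc))
      = match st with
        | none => pvAouter lines acc
        | some ti => pvAinner lines ti acc := by
  induction lines with
  | nil =>
    intro st acc
    cases st <;> simp [pvFinish, pvAouter, pvAinner]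
  | cons line rest ih =>
    intro st acc
    cases st with
    | none =>
      simp only [List.foldl_cons, pvBstep, pvAouter]
      by_cases hTry : PySem.Str.startswith (PySem.Str.strip line) "try:" = true
      · simp only [hTry, if_true]
        exact ih (some (pvIndent line)) (acc ++ [line])
      · simp only [hTry, Bool.false_eq_true, if_false]
        exact ih none (acc ++ [line])
    | some ti =>
      simp only [List.foldl_cons, pvBstep, pvAinner]
      by_cases hs : PySem.Str.strip line = ""
      · simp only [hs, ne_eq, not_true_eq_false, false_and, if_false]
        rw [if_neg (fun hc => by omega)]
        exact ih (some ti) (acc ++ [line])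
      · simp only [ne_eq, hs, not_false_eq_true, if_true]
        split_ifs with h1 h2
        · exact ih none (acc ++ [line])
        · exact ih none (acc ++ [pvExcLine ti, pvPassLine ti, line])
        · exact ih (some ti) (acc ++ [line])

-- ===== VERDICT (by name: the statement is the Claim_ definition above) =====
theorem fix_incomplete_try_blocks_py_spec : Claim_equal_fix_incomplete_try_blocks_py := by
  intro content _
  unfold Spec_fix_incomplete_try_blocks_py fix_incomplete_try_blocks_py fix_incomplete_try_blocks_py_alt
  have h := pvMain ((PySem.Str.split? content "\n").getD []) none []
  simp only [pvFinish] at h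
  exact congrArg (PySem.Str.join "\n") h.symm
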